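-- pv_equiv track=rewrite | github.com/Ankit-Mehra/leet_code | valid_parentheses.py | open_close
-- ===== SOURCE A (Python) =====
-- def open_close(s:str)->bool:
--     """check if opening closing brackets are in order"""
--     open_brackets = ['{','[','(']
--     closed_brackets = ['}',']',')']
--     list_s = list(s)
--     for i in range(len(list_s)-1):
--         if (list_s[i] in open_brackets and list_s[i+1] in closed_brackets):
--             return False
--     return True
-- ===== SOURCE B (Python) =====
-- def open_close(s: str) -> bool:
--     """check if opening closing brackets are in order"""
--     return not any(o + c in s for o in '{[(' for c in '}])')
-- ===== Notes on version B (the rewrite author's own statement) =====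
-- stated objective: faster
-- what changed: Instead of scanning the string index by index for an open bracket followed by a close bracket, B enumerates the nine forbidden two-character substrings (open+close combinations) and asks for each whether it occurs in s via substring search; the string is valid iff none occurs.
import Mathlib
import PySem

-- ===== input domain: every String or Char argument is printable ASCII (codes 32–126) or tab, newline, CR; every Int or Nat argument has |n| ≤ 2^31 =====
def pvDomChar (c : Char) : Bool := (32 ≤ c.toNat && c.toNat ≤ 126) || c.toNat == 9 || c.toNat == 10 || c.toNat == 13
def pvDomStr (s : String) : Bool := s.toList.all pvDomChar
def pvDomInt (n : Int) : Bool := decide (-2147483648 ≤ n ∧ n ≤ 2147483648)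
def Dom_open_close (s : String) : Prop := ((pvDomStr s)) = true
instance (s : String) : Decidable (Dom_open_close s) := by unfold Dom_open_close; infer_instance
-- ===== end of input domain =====

-- B replaces A's index scan for an adjacent open/close pair by enumerating the nine
-- forbidden two-character substrings and testing each with substring search (same values).

-- ===== PORT A =====
-- the for-loop with early return False; indices drawn from the range are always in
-- bounds, so the pyGetD default ' ' is never used
def openCloseLoopA (cs ob cb : List Char) : List Int → Bool
  | [] => true
  | i :: rest =>
    if PySem.List.pyGetD cs i ' ' ∈ ob ∧ PySem.List.pyGetD cs (i + 1) ' ' ∈ cb then false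
    else openCloseLoopA cs ob cb rest

def open_close (s : String) : Bool :=
  let open_brackets : List Char := ['{', '[', '(']
  let closed_brackets : List Char := ['}', ']', ')']
  let list_s := s.toList
  openCloseLoopA list_s open_brackets closed_brackets
    (PySem.List.pyRange 0 ((list_s.length : Int) - 1) 1)

-- ===== PORT B =====
-- not any(o + c in s for o in '{[(' for c in '}])')
def open_close_alt (s : String) : Bool :=
  !("{[(".toList.any fun o =>
      "}])".toList.any fun c => PySem.Str.isIn (String.ofList [o, c]) s)

-- ===== PRECONDITION & SPEC =====
def Spec_open_close (s : String) (out : Bool) : Prop := out = open_close_alt s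
instance (s : String) (out : Bool) : Decidable (Spec_open_close s out) := by unfold Spec_open_close; infer_instance

-- ===== CLAIM (what is proved, stated in full; the proofs are below) =====
def Claim_equal_open_close : Prop := ∀ (s : String), Dom_open_close s → Spec_open_close s (open_close s)

-- ===== LEMMAS AND PROOFS =====

-- a two-element list is an infix exactly when it occurs as an adjacent pair
theorem infix_pair_iff (o c : Char) : ∀ cs : List Char,
    ([o, c] <:+: cs ↔ (o, c) ∈ cs.zip cs.tail)
  | [] => by simp
  | [x] => by
    constructor
    · intro h
      have := h.length_le
      simp at this
    · simp
  | x :: y :: rest => by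
    rw [List.infix_cons_iff]
    constructor
    · rintro (h | h)
      · rcases List.cons_prefix_cons.1 h with ⟨rfl, h2⟩
        rcases List.cons_prefix_cons.1 h2 with ⟨rfl, _⟩
        simp
      · have := (infix_pair_iff o c (y :: rest)).1 h
        simp only [List.tail_cons, List.zip_cons_cons, List.mem_cons]
        right
        simpa using this
    · intro h
      simp only [List.tail_cons, List.zip_cons_cons, List.mem_cons] at h
      rcases h with h | h
      · left
        obtain ⟨rfl, rfl⟩ : o = x ∧ c = y := Prod.mk.injEq .. ▸ h
        exact List.cons_prefix_cons.2 ⟨rfl, List.cons_prefix_cons.2 ⟨rfl, List.nil_prefix⟩⟩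
      · right
        exact (infix_pair_iff o c (y :: rest)).2 (by simpa using h)

-- A's loop, unrolled to the adjacent-pair scan
theorem loopA_shift (x : Char) (cs ob cb : List Char) (idxs : List Int)
    (h : ∀ j ∈ idxs, 0 ≤ j) :
    openCloseLoopA (x :: cs) ob cb (idxs.map (· + 1)) = openCloseLoopA cs ob cb idxs := by
  induction idxs with
  | nil => rfl
  | cons j rest ih =>
    have hj : 0 ≤ j := h j (by simp)
    obtain ⟨n, rfl⟩ : ∃ n : Nat, j = (n : Int) := ⟨j.toNat, (Int.toNat_of_nonneg hj).symm⟩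
    have e1 : (n : Int) + 1 = ((n + 1 : Nat) : Int) := by push_cast; ring
    have e2 : (n : Int) + 1 + 1 = ((n + 2 : Nat) : Int) := by push_cast; ring
    simp only [List.map_cons, openCloseLoopA]
    rw [e2, e1]
    simp only [PySem.List.pyGetD_natCast, List.getD, List.getElem?_cons_succ]
    rw [ih (fun j hj => h j (by simp [hj]))]

theorem pyRange_one_shift (n : Int) :
    PySem.List.pyRange 1 n 1 = (PySem.List.pyRange 0 (n - 1) 1).map (· + 1) := by
  simp only [PySem.List.pyRange_one, List.map_map]
  have : (n - 1 - 0).toNat = (n - 1).toNat := by omega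
  rw [this]
  apply List.map_congr_left
  intro k _
  simp; ring

theorem loopA_eq_zip (cs ob cb : List Char) (h : ob = ['{', '[', '('] ∧ cb = ['}', ']', ')']) :
    openCloseLoopA cs ob cb (PySem.List.pyRange 0 ((cs.length : Int) - 1) 1)
      = !((cs.zip cs.tail).any
          (fun p => "{[(".toList.contains p.1 && "}])".toList.contains p.2)) := by
  obtain ⟨rfl, rfl⟩ := h
  induction cs with
  | nil => rfl
  | cons x rest ih =>
    cases rest with
    | nil => rfl
    | cons y rest' =>
      have hlen : (0 : Int) < ((x :: y :: rest').length : Int) - 1 := by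
        simp
      rw [PySem.List.pyRange_one_cons hlen]
      have hr : PySem.List.pyRange 1 (((x :: y :: rest').length : Int) - 1) 1
          = (PySem.List.pyRange 0 (((y :: rest').length : Int) - 1) 1).map (· + 1) := by
        rw [pyRange_one_shift]
        congr 1
        simp
      rw [openCloseLoopA]
      simp only [zero_add]
      rw [hr,
        loopA_shift x (y :: rest') _ _ _
          (fun j hj => ((PySem.List.mem_pyRange_one).1 hj).1), ih]
      have g0 : PySem.List.pyGetD (x :: y :: rest') 0 ' ' = x := by
        simp [PySem.List.pyGetD_zero_cons]
      have g1 : PySem.List.pyGetD (x :: y :: rest') 1 ' ' = y := by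
        have : (1 : Int) = ((1 : Nat) : Int) := by norm_num
        rw [this, PySem.List.pyGetD_natCast]
        rfl
      rw [g0, g1]
      simp only [List.tail_cons, List.zip_cons_cons, List.any_cons]
      have hs1 : "{[(".toList = ['{', '[', '('] := rfl
      have hs2 : "}])".toList = ['}', ']', ')'] := rfl
      by_cases hx : x ∈ ['{', '[', '('] ∧ y ∈ ['}', ']', ')']
      · rw [if_pos hx]
        have hf : (['{', '[', '('].contains x && ['}', ']', ')'].contains y) = true := by
          simp only [Bool.and_eq_true, List.contains_iff_mem]
          exact hx
        rw [hs1, hs2, hf]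
        simp
      · rw [if_neg hx]
        have hf : (['{', '[', '('].contains x && ['}', ']', ')'].contains y) = false := by
          rcases Bool.eq_false_or_eq_true (['{', '[', '('].contains x) with h1 | h1
          · rcases Bool.eq_false_or_eq_true (['}', ']', ')'].contains y) with h2 | h2
            · exact absurd ⟨List.contains_iff_mem.1 h1, List.contains_iff_mem.1 h2⟩ hx
            · rw [h2, Bool.and_false]
          · rw [h1, Bool.false_and]
        rw [hs1, hs2, hf]
        simp

-- B's nine substring tests equal the adjacent-pair scan
theorem altB_eq_zip (s : String) :
    open_close_alt s
      = !((s.toList.zip s.toList.tail).any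
          (fun p => "{[(".toList.contains p.1 && "}])".toList.contains p.2)) := by
  unfold open_close_alt
  congr 1
  rw [Bool.eq_iff_iff]
  simp only [List.any_eq_true, PySem.Str.isIn_iff_infix, Bool.and_eq_true,
    List.contains_iff_mem]
  constructor
  · rintro ⟨o, ho, c, hc, hinf⟩
    have : (o, c) ∈ s.toList.zip s.toList.tail := by
      have hinf' : [o, c] <:+: s.toList := by
        have e : (String.ofList [o, c]).toList = [o, c] := String.toList_ofList
        rwa [e] at hinf
      exact (infix_pair_iff o c s.toList).1 hinf'
    exact ⟨(o, c), this, ho, hc⟩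
  · rintro ⟨⟨o, c⟩, hmem, ho, hc⟩
    refine ⟨o, ho, c, hc, ?_⟩
    have e : (String.ofList [o, c]).toList = [o, c] := String.toList_ofList
    rw [e]
    exact (infix_pair_iff o c s.toList).2 hmem

-- ===== VERDICT (by name: the statement is the Claim_ definition above) =====
theorem open_close_spec : Claim_equal_open_close := by
  intro s _
  unfold Spec_open_close
  rw [altB_eq_zip]
  exact loopA_eq_zip s.toList _ _ ⟨rfl, rfl⟩
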